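-- pv_equiv track=rewrite | github.com/LemonITCN/presolver | service/rule_formula_check.py | calculate_max_count
-- ===== SOURCE A (Python) =====
-- def calculate_max_count(num_array: []) -> int:
--     count = 0
--     num_hold = 0
--     for x in num_array:
--         if x > num_hold:
--             count = count + 1
--             num_hold = x
--     return count
-- ===== SOURCE B (Python) =====
-- from itertools import accumulate
--
-- def calculate_max_count(num_array: []) -> int:
--     pm = list(accumulate(num_array, max, initial=0))
--     return sum(1 for a, b in zip(pm, pm[1:]) if b > a)
-- ===== Notes on version B (the rewrite author's own statement) =====
-- stated objective: idiomatic
-- what changed: Replaces the manual count/num_hold tracking loop with itertools.accumulate(max, initial=0) to materialize the prefix-maximum sequence, then counts adjacent strictly increasing pairs.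
import Mathlib
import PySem

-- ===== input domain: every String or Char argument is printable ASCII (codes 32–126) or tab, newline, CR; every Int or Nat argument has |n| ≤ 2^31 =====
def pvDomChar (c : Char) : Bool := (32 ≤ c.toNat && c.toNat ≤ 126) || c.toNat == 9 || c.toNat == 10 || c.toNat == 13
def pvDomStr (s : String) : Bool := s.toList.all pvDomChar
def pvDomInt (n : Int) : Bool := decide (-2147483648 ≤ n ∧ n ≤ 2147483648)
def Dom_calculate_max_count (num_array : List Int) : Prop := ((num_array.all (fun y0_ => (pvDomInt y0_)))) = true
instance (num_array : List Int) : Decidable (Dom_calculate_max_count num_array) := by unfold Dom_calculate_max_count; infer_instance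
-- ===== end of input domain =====

-- B replaces the manual count/num_hold loop with a prefix-maximum sequence (accumulate with seed 0) and counts adjacent strict increases; objective: idiomatic (same cost).

-- ===== PORT A =====
def calculate_max_count (num_array : List Int) : Int :=
  (num_array.foldl (fun (s : Int × Int) x => if x > s.2 then (s.1 + 1, x) else s) (0, 0)).1

-- ===== PORT B =====
def calculate_max_count_alt (num_array : List Int) : Int :=
  let pm := List.scanl (fun a b => max a b) 0 num_array
  ((pm.zip pm.tail).countP (fun p => p.1 < p.2) : Int)

-- ===== PRECONDITION & SPEC =====
def Spec_calculate_max_count (num_array : List Int) (out : Int) : Prop := out = calculate_max_count_alt num_array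
instance (num_array : List Int) (out : Int) : Decidable (Spec_calculate_max_count num_array out) := by unfold Spec_calculate_max_count; infer_instance

-- ===== CLAIM (what is proved, stated in full; the proofs are below) =====
def Claim_equal_calculate_max_count : Prop := ∀ (num_array : List Int), Dom_calculate_max_count num_array → Spec_calculate_max_count num_array (calculate_max_count num_array)

-- ===== LEMMAS AND PROOFS =====

-- ===== VERDICT (by name: the statement is the Claim_ definition above) =====
lemma cmc_loop (xs : List Int) : ∀ (c h : Int),
    (xs.foldl (fun (s : Int × Int) x => if x > s.2 then (s.1 + 1, x) else s) (c, h)).1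
      = c + (((List.scanl (fun a b => max a b) h xs).zip
              (List.scanl (fun a b => max a b) h xs).tail).countP (fun p => p.1 < p.2) : Int) := by
  induction xs with
  | nil => intro c h; simp
  | cons x xs ih =>
    intro c h
    have key := ih (if x > h then c + 1 else c) (max h x)
    by_cases hx : x > h
    · have hmx : max h x = x := max_eq_right (le_of_lt hx)
      rw [if_pos hx, hmx] at key
      simp only [List.foldl_cons, hx, if_pos]
      rw [key]
      rcases xs with _ | ⟨y, ys⟩
      · simp [List.scanl_cons, List.scanl_nil, hmx, hx]
      · simp only [List.scanl_cons, hmx, List.tail_cons, List.zip_cons_cons, List.countP_cons]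
        simp only [hx, decide_true]
        push_cast
        ring
    · have hmx : max h x = h := max_eq_left (le_of_not_gt hx)
      rw [if_neg hx, hmx] at key
      simp only [List.foldl_cons, hx, if_false]
      rw [key]
      rcases xs with _ | ⟨y, ys⟩
      · simp [List.scanl_cons, List.scanl_nil, hmx]
      · simp only [List.scanl_cons, hmx, List.tail_cons, List.zip_cons_cons, List.countP_cons]
        simp

theorem calculate_max_count_spec : Claim_equal_calculate_max_count := by
  intro xs _
  unfold Spec_calculate_max_count calculate_max_count calculate_max_count_alt
  simpa using cmc_loop xs 0 0
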